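-- pv_equiv track=rewrite | github.com/santimolina1/Project_0 | parse.py | changeCommand
-- ===== SOURCE A (Python) =====
-- commands1={'drop','get','grab','letGo'}
--
-- commands2={'leap','walk'}
--
-- commands3={'jump'}
--
-- commands4={'nop'}
--
-- commands5={'turn'}
--
-- commands6={'turnto'}
--
-- commands7={'defVar'}
--
-- commands8={'defProc'}
--
-- condiciones={"can","facing","not"}
--
-- def changeCommand(programa):
--     newCommands=[]
--     for command in programa:
--         if command in commands1:
--             command='S'
--         elif command in commands2:
--             command='P'
--         elif command in commands3:
--             command='J'
--         elif command in commands4: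
--             command='N'
--         elif command in commands5:
--             command='T'
--         elif command in commands6:
--             command='H'
--         elif command in commands7:
--             command='B'
--         elif command in commands8:
--             command='F'
--         elif command.isnumeric():
--             command = '#'
--         elif command=="if":
--             command='I'
--         elif command=="while":
--             command='W'
--         elif command in condiciones:
--             command='O'
--         elif command=="repeat":
--             command='R'
--         newCommands.append(command)
--     return newCommands
-- ===== SOURCE B (Python) =====
-- GROUPS = [
--     ('S', {'drop', 'get', 'grab', 'letGo'}),
--     ('P', {'leap', 'walk'}),
--     ('J', {'jump'}),
--     ('N', {'nop'}),
--     ('T', {'turn'}),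
--     ('H', {'turnto'}),
--     ('B', {'defVar'}),
--     ('F', {'defProc'}),
--     ('I', {'if'}),
--     ('W', {'while'}),
--     ('O', {'can', 'facing', 'not'}),
--     ('R', {'repeat'}),
-- ]
--
-- def changeCommand(programa):
--     # staged rewriting: one whole-list pass per code group, then a numeric pass;
--     # safe because no code letter is a token of any group nor numeric
--     out = list(programa)
--     for code, toks in GROUPS:
--         out = [code if c in toks else c for c in out]
--     return ['#' if c.isnumeric() else c for c in out]
-- ===== Notes on version B (the rewrite author's own statement) =====
-- stated objective: alternative
-- what changed: Replaced the single-pass 13-branch elif dispatch with staged whole-list rewriting: twelve passes each substituting one code group's tokens over the entire list, followed by a final numeric-to-'#' pass; correct because produced codes never collide with later groups' tokens or with isnumeric.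
import Mathlib
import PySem

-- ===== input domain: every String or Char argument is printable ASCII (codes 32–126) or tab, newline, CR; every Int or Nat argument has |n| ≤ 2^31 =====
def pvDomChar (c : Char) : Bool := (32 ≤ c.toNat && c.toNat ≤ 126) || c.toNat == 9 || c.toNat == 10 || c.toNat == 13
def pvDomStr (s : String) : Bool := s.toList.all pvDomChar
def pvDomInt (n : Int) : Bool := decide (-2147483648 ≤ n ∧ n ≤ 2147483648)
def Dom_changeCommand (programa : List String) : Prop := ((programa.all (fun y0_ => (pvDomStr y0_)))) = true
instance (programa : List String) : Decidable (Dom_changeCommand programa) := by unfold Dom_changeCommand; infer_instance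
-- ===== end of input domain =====

-- B replaces A's single-pass 13-branch elif dispatch with staged whole-list rewrite
-- passes (one per code group, then a numeric pass); objective: alternative decomposition.
-- isnumeric is ported as PySem.Str.strIsdigit, exact on the printable-ASCII domain.

-- ===== PORT A =====
def commands1 : PySem.Set String := PySem.Set.ofList ["drop", "get", "grab", "letGo"]
def commands2 : PySem.Set String := PySem.Set.ofList ["leap", "walk"]
def commands3 : PySem.Set String := PySem.Set.ofList ["jump"]
def commands4 : PySem.Set String := PySem.Set.ofList ["nop"]
def commands5 : PySem.Set String := PySem.Set.ofList ["turn"]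
def commands6 : PySem.Set String := PySem.Set.ofList ["turnto"]
def commands7 : PySem.Set String := PySem.Set.ofList ["defVar"]
def commands8 : PySem.Set String := PySem.Set.ofList ["defProc"]
def condiciones : PySem.Set String := PySem.Set.ofList ["can", "facing", "not"]

def changeCommand (programa : List String) : List String :=
  programa.foldl (fun newCommands command =>
    let command :=
      if PySem.Set.contains commands1 command then "S"
      else if PySem.Set.contains commands2 command then "P"
      else if PySem.Set.contains commands3 command then "J"
      else if PySem.Set.contains commands4 command then "N"
      else if PySem.Set.contains commands5 command then "T"
      else if PySem.Set.contains commands6 command then "H"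
      else if PySem.Set.contains commands7 command then "B"
      else if PySem.Set.contains commands8 command then "F"
      else if PySem.Str.strIsdigit command then "#"
      else if command = "if" then "I"
      else if command = "while" then "W"
      else if PySem.Set.contains condiciones command then "O"
      else if command = "repeat" then "R"
      else command
    newCommands ++ [command]) []

-- ===== PORT B =====
def GROUPS : List (String × PySem.Set String) :=
  [("S", PySem.Set.ofList ["drop", "get", "grab", "letGo"]),
   ("P", PySem.Set.ofList ["leap", "walk"]),
   ("J", PySem.Set.ofList ["jump"]),
   ("N", PySem.Set.ofList ["nop"]),
   ("T", PySem.Set.ofList ["turn"]),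
   ("H", PySem.Set.ofList ["turnto"]),
   ("B", PySem.Set.ofList ["defVar"]),
   ("F", PySem.Set.ofList ["defProc"]),
   ("I", PySem.Set.ofList ["if"]),
   ("W", PySem.Set.ofList ["while"]),
   ("O", PySem.Set.ofList ["can", "facing", "not"]),
   ("R", PySem.Set.ofList ["repeat"])]

def changeCommand_alt (programa : List String) : List String :=
  let out := GROUPS.foldl
    (fun out cg => out.map (fun c => if PySem.Set.contains cg.2 c then cg.1 else c))
    programa
  out.map (fun c => if PySem.Str.strIsdigit c then "#" else c)

-- ===== PRECONDITION & SPEC =====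
def Spec_changeCommand (programa : List String) (out : List String) : Prop := out = changeCommand_alt programa
instance (programa : List String) (out : List String) : Decidable (Spec_changeCommand programa out) := by unfold Spec_changeCommand; infer_instance

-- ===== CLAIM (what is proved, stated in full; the proofs are below) =====
def Claim_equal_changeCommand : Prop := ∀ (programa : List String), Dom_changeCommand programa → Spec_changeCommand programa (changeCommand programa)

-- ===== LEMMAS AND PROOFS =====

lemma foldl_push_eq_map {α β : Type} (f : α → β) :
    ∀ (l : List α) (acc : List β),
      l.foldl (fun a x => a ++ [f x]) acc = acc ++ l.map f := by
  intro l
  induction l with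
  | nil => simp
  | cons x xs ih => intro acc; simp [List.foldl, ih]

-- staged whole-list passes = one pass applying the stages pointwise
lemma foldl_map_passes {α γ : Type} (f : γ → α → α) :
    ∀ (gs : List γ) (xs : List α),
      gs.foldl (fun out g => out.map (f g)) xs
        = xs.map (fun x => gs.foldl (fun x g => f g x) x) := by
  intro gs
  induction gs with
  | nil => intro xs; simp
  | cons g gs ih =>
    intro xs
    simp only [List.foldl_cons, ih, List.map_map]
    rfl

lemma contains_ofList_false {s : String} {L : List String} (h : s ∉ L) :
    PySem.Set.contains (PySem.Set.ofList L) s = false := by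
  rw [Bool.eq_false_iff]
  intro hc
  exact h ((PySem.Set.mem_ofList _ _).mp ((PySem.Set.contains_iff _ _).mp hc))

-- a token contained in none of the stage sets is left unchanged by the staged passes
lemma foldl_id_of_not_contains (s : String) :
    ∀ (gs : List (String × PySem.Set String)),
      (∀ cg ∈ gs, PySem.Set.contains cg.2 s = false) →
      gs.foldl (fun c cg => if PySem.Set.contains cg.2 c then cg.1 else c) s = s := by
  intro gs
  induction gs with
  | nil => intro _; rfl
  | cons g gs ih =>
    intro h
    simp only [List.foldl_cons, h g (List.mem_cons_self ..), Bool.false_eq_true, if_false]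
    exact ih (fun cg hcg => h cg (List.mem_cons_of_mem _ hcg))

set_option maxHeartbeats 1000000 in
lemma step_eq (s : String) :
    (if PySem.Set.contains commands1 s then "S"
      else if PySem.Set.contains commands2 s then "P"
      else if PySem.Set.contains commands3 s then "J"
      else if PySem.Set.contains commands4 s then "N"
      else if PySem.Set.contains commands5 s then "T"
      else if PySem.Set.contains commands6 s then "H"
      else if PySem.Set.contains commands7 s then "B"
      else if PySem.Set.contains commands8 s then "F"
      else if PySem.Str.strIsdigit s then "#"
      else if s = "if" then "I"
      else if s = "while" then "W"
      else if PySem.Set.contains condiciones s then "O"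
      else if s = "repeat" then "R"
      else s)
    = (fun c => if PySem.Str.strIsdigit c then "#" else c)
        (GROUPS.foldl (fun c cg => if PySem.Set.contains cg.2 c then cg.1 else c) s) := by
  by_cases h : s ∈ (["drop", "get", "grab", "letGo", "leap", "walk", "jump", "nop", "turn",
      "turnto", "defVar", "defProc", "if", "while", "can", "facing", "not", "repeat"] : List String)
  · simp only [List.mem_cons, List.not_mem_nil, or_false] at h
    rcases h with rfl|rfl|rfl|rfl|rfl|rfl|rfl|rfl|rfl|rfl|rfl|rfl|rfl|rfl|rfl|rfl|rfl|rfl <;> decide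
  · simp only [List.mem_cons, List.not_mem_nil, or_false, not_or] at h
    obtain ⟨h1, h2, h3, h4, h5, h6, h7, h8, h9, h10, h11, h12, h13, h14, h15, h16, h17, h18⟩ := h
    have hid : GROUPS.foldl (fun c cg => if PySem.Set.contains cg.2 c then cg.1 else c) s = s := by
      apply foldl_id_of_not_contains
      intro cg hcg
      simp only [GROUPS, List.mem_cons, List.not_mem_nil, or_false] at hcg
      rcases hcg with rfl|rfl|rfl|rfl|rfl|rfl|rfl|rfl|rfl|rfl|rfl|rfl <;>
        exact contains_ofList_false (by simp_all)
    have c1 : PySem.Set.contains commands1 s = false := by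
      unfold commands1; exact contains_ofList_false (by simp_all)
    have c2 : PySem.Set.contains commands2 s = false := by
      unfold commands2; exact contains_ofList_false (by simp_all)
    have c3 : PySem.Set.contains commands3 s = false := by
      unfold commands3; exact contains_ofList_false (by simp_all)
    have c4 : PySem.Set.contains commands4 s = false := by
      unfold commands4; exact contains_ofList_false (by simp_all)
    have c5 : PySem.Set.contains commands5 s = false := by
      unfold commands5; exact contains_ofList_false (by simp_all)
    have c6 : PySem.Set.contains commands6 s = false := by
      unfold commands6; exact contains_ofList_false (by simp_all)
    have c7 : PySem.Set.contains commands7 s = false := by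
      unfold commands7; exact contains_ofList_false (by simp_all)
    have c8 : PySem.Set.contains commands8 s = false := by
      unfold commands8; exact contains_ofList_false (by simp_all)
    have cc : PySem.Set.contains condiciones s = false := by
      unfold condiciones; exact contains_ofList_false (by simp_all)
    rw [hid]
    simp only [c1, c2, c3, c4, c5, c6, c7, c8, cc, Bool.false_eq_true, if_false]
    by_cases hd : PySem.Str.strIsdigit s
    · rw [if_pos hd, if_pos hd]
    · rw [if_neg hd, if_neg h13, if_neg h14, if_neg h18, if_neg hd]

-- ===== VERDICT (by name: the statement is the Claim_ definition above) =====
set_option maxHeartbeats 1000000 in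
theorem changeCommand_spec : Claim_equal_changeCommand := by
  intro programa _
  unfold Spec_changeCommand changeCommand changeCommand_alt
  rw [foldl_push_eq_map,
    foldl_map_passes (f := fun (cg : String × PySem.Set String) c =>
      if PySem.Set.contains cg.2 c then cg.1 else c)]
  simp only [List.nil_append, List.map_map]
  apply List.map_congr_left
  intro s _
  simp only [Function.comp_apply]
  exact step_eq s
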